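-- pv_equiv track=rewrite | github.com/StarSein/BaekJoon | 백준/Gold/5546. 파스타/파스타.py | solution
-- ===== SOURCE A (Python) =====
-- from typing import List, Tuple
--
-- def solution(N: int, K: int, plans: List[Tuple[int, int]]) -> int:
--     MOD = 10_000
--     dp = [[[0, 0] for j in range(3)] for i in range(N)]
--     planned = [-1 for _ in range(N)]
--     for day, sauce in plans:
--         planned[day] = sauce
--
--     if planned[0] == -1:
--         for j in range(3):
--             dp[0][j][0] = 1
--     else:
--         sauce = plans[0][1]
--         dp[0][sauce][0] = 1
--
--     TOMATO, CREAM, BASIL = 0, 1, 2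
--
--     for i in range(1, N):
--         if planned[i] == -1:
--             dp[i][TOMATO][0] = (sum(dp[i - 1][CREAM]) + sum(dp[i - 1][BASIL])) % MOD
--             dp[i][CREAM][0] = (sum(dp[i - 1][TOMATO]) + sum(dp[i - 1][BASIL])) % MOD
--             dp[i][BASIL][0] = (sum(dp[i - 1][TOMATO]) + sum(dp[i - 1][CREAM])) % MOD
--             for sauce in range(3):
--                 dp[i][sauce][1] = dp[i - 1][sauce][0]
--         else:
--             sauce = planned[i]
--             match sauce:
--                 case 0:
--                     dp[i][TOMATO][0] = (sum(dp[i - 1][CREAM]) + sum(dp[i - 1][BASIL])) % MOD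
--                 case 1:
--                     dp[i][CREAM][0] = (sum(dp[i - 1][TOMATO]) + sum(dp[i - 1][BASIL])) % MOD
--                 case 2:
--                     dp[i][BASIL][0] = (sum(dp[i - 1][TOMATO]) + sum(dp[i - 1][CREAM])) % MOD
--             dp[i][sauce][1] = dp[i - 1][sauce][0]
--     answer = sum(sum(dp[N - 1][sauce]) for sauce in range(3)) % MOD
--     return answer
-- ===== SOURCE B (Python) =====
-- from typing import List, Tuple
--
-- def solution(N: int, K: int, plans: List[Tuple[int, int]]) -> int:
--     MOD = 10_000
--     planned = [-1] * N
--     for day, sauce in plans: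
--         planned[day] = sauce
--
--     # Backward (suffix) DP: g[j][k] = number of valid ways to fill all the days
--     # AFTER the current one, given the current day uses sauce j with run length k+1.
--     g = [[1, 1] for _ in range(3)]
--     for p in reversed(planned[1:]):
--         g = [[(sum(g[s][0] for s in range(3) if s != j and (p == -1 or p == s))
--                + (g[j][1] if (p == -1 or p == j) else 0)) % MOD,
--               sum(g[s][0] for s in range(3) if s != j and (p == -1 or p == s)) % MOD]
--              for j in range(3)]
--
--     first = [j for j in range(3) if planned[0] == -1 or j == plans[0][1]]
--     return sum(g[j][0] for j in first) % MOD
-- ===== Notes on version B (the rewrite author's own statement) =====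
-- stated objective: alternative
-- what changed: Replaces A's forward bottom-up table of prefix counts (dp[i][sauce][run] built left to right over the N x 3 x 2 table with per-sauce branch writes) by a backward suffix DP: a single 3x2 vector g[j][k] = number of ways to fill all later days, folded over the planned days in reverse, combined at the end with the allowed day-0 sauces.
-- outside the precondition, e.g. on solution(2, 0, [(1, -2)]): A returns 1, B returns 0; on solution(1, 0, [(0, 1), (0, 5)]): A returns 1, B returns 1
import Mathlib
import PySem

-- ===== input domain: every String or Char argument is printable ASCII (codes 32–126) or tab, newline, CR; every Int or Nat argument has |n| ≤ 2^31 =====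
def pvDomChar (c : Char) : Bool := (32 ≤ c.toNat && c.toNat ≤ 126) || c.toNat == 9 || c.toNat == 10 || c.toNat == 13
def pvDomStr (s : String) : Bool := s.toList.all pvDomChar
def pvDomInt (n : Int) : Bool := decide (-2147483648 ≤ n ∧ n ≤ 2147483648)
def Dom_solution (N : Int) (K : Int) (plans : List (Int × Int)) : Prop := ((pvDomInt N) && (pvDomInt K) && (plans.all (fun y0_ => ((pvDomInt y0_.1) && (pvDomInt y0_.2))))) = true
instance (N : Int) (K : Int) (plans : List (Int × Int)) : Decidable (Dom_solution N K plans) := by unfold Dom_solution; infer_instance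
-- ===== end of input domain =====

-- B replaces A's forward bottom-up N x 3 x 2 prefix-count table by a backward suffix DP:
-- one 3x2 vector of completion counts folded over the planned days in reverse, combined at
-- the end with the allowed day-0 sauces (objective: alternative).
-- Pre_ restricts to the natural domain (sauces 0..2); outside it A raises IndexError or silently
-- wraps a negative sauce around the dp rows, a quirk B's algorithm never needs.


-- ===== PORT A =====
-- `planned[day] = sauce` with Python index semantics (a negative index counts from the end);
-- Python raises IndexError out of range — excluded by Pre_, the port leaves the list unchanged there.
-- Both Pythons contain this identical planned-building loop, so both ports use pvSetIdx/pvPlanned.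
def pvSetIdx (xs : List Int) (i : Int) (v : Int) : List Int :=
  let j := if i < 0 then i + xs.length else i
  if 0 ≤ j ∧ j < (xs.length : Int) then xs.set j.toNat v else xs

def pvPlanned (N : Int) (plans : List (Int × Int)) : List Int :=
  plans.foldl (fun pl ds => pvSetIdx pl ds.1 ds.2) (List.replicate N.toNat (-1))

-- dp cell/row helpers for A's table: dp[i] is a row `List (List Int)` of 3 cells [run1, run2]
def pvCell (r : List (List Int)) (j k : Nat) : Int := (r.getD j []).getD k 0
def pvSetCell (r : List (List Int)) (j k : Nat) (v : Int) : List (List Int) :=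
  r.set j ((r.getD j []).set k v)
-- Python's dp[i][sauce] for -3 <= sauce < 3: a negative sauce wraps around the 3-element row
def pvIdx3 (p : Int) : Nat := (if p < 0 then p + 3 else p).toNat
-- sum(dp[i][j])
def pvRSum (r : List (List Int)) (j : Nat) : Int := pvCell r j 0 + pvCell r j 1
-- [[0, 0] for j in range(3)]
def pvZeroRow : List (List Int) := [[0, 0], [0, 0], [0, 0]]

-- the body of A's `for i in range(1, N)`: every Python statement writes one cell of row i,
-- reading only row i-1; the sequential cell writes on row i are kept in order.
def pvStepRowA (prev row : List (List Int)) (p : Int) : List (List Int) :=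
  if p = -1 then
    let r1 := pvSetCell row 0 0 (PySem.Int.mod (pvRSum prev 1 + pvRSum prev 2) 10000)
    let r2 := pvSetCell r1 1 0 (PySem.Int.mod (pvRSum prev 0 + pvRSum prev 2) 10000)
    let r3 := pvSetCell r2 2 0 (PySem.Int.mod (pvRSum prev 0 + pvRSum prev 1) 10000)
    (List.range 3).foldl (fun r s => pvSetCell r s 1 (pvCell prev s 0)) r3
  else
    let r1 :=
      if p = 0 then pvSetCell row 0 0 (PySem.Int.mod (pvRSum prev 1 + pvRSum prev 2) 10000)
      else if p = 1 then pvSetCell row 1 0 (PySem.Int.mod (pvRSum prev 0 + pvRSum prev 2) 10000)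
      else if p = 2 then pvSetCell row 2 0 (PySem.Int.mod (pvRSum prev 0 + pvRSum prev 1) 10000)
      else r1_none
    -- dp[i][sauce][1] = dp[i-1][sauce][0]; for sauce outside -3..2 Python raises IndexError — excluded by Pre_
    if -3 ≤ p ∧ p < 3 then pvSetCell r1 (pvIdx3 p) 1 (pvCell prev (pvIdx3 p) 0) else r1
where r1_none := row  -- Python's match has no case for other sauces: nothing is written

-- day-0 initialisation: A writes into row 0 of the all-zero table
def pvInitA (N : Int) (plans : List (Int × Int)) : List (List (List Int)) :=
  if (pvPlanned N plans).getD 0 (-1) = -1 then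
    (List.replicate N.toNat pvZeroRow).set 0
      ((List.range 3).foldl (fun r j => pvSetCell r j 0 1) ((List.replicate N.toNat pvZeroRow).getD 0 []))
  else
    -- dp[0][sauce][0] = 1 with sauce = plans[0][1]; Python raises for sauce outside -3..2 — excluded by Pre_
    if -3 ≤ (plans.headD (0, 0)).2 ∧ (plans.headD (0, 0)).2 < 3 then
      (List.replicate N.toNat pvZeroRow).set 0
        (pvSetCell ((List.replicate N.toNat pvZeroRow).getD 0 []) (pvIdx3 (plans.headD (0, 0)).2) 0 1)
    else List.replicate N.toNat pvZeroRow

-- A's main loop `for i in range(1, b)`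
def pvFoldA (P : List Int) (dp1 : List (List (List Int))) (b : Int) : List (List (List Int)) :=
  (PySem.List.pyRange 1 b 1).foldl
    (fun dp i => dp.set i.toNat (pvStepRowA (dp.getD (i.toNat - 1) []) (dp.getD i.toNat []) (P.getD i.toNat 0)))
    dp1

def solution (N : Int) (K : Int) (plans : List (Int × Int)) : Int :=
  PySem.Int.mod
    (pvRSum ((pvFoldA (pvPlanned N plans) (pvInitA N plans) N).getD (N.toNat - 1) []) 0 +
     pvRSum ((pvFoldA (pvPlanned N plans) (pvInitA N plans) N).getD (N.toNat - 1) []) 1 +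
     pvRSum ((pvFoldA (pvPlanned N plans) (pvInitA N plans) N).getD (N.toNat - 1) []) 2) 10000

-- ===== PORT B =====
-- body of B's `for p in reversed(planned[1:])`: g[j][k] = ways to fill the later days given the
-- current day uses sauce j with run length k+1 (indices j, s range over 0..2, so plain getD is exact)
def pvBackStep (g : List (List Int)) (p : Int) : List (List Int) :=
  (PySem.List.pyRange 0 3 1).map (fun j =>
    [PySem.Int.mod
       (((PySem.List.pyRange 0 3 1).filter (fun s => decide (s ≠ j ∧ (p = -1 ∨ p = s)))).foldl
          (fun acc s => acc + (g.getD s.toNat []).getD 0 0) 0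
        + (if p = -1 ∨ p = j then (g.getD j.toNat []).getD 1 0 else 0)) 10000,
     PySem.Int.mod
       (((PySem.List.pyRange 0 3 1).filter (fun s => decide (s ≠ j ∧ (p = -1 ∨ p = s)))).foldl
          (fun acc s => acc + (g.getD s.toNat []).getD 0 0) 0) 10000])

-- `sum(g[j][0] for j in first)` with first = [j for j in range(3) if planned[0] == -1 or j == plans[0][1]]
def pvFirstSum (N : Int) (plans : List (Int × Int)) (g : List (List Int)) : Int :=
  ((PySem.List.pyRange 0 3 1).filter
      (fun j => decide ((pvPlanned N plans).getD 0 (-1) = -1 ∨ j = (plans.headD (0, 0)).2))).foldl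
    (fun acc j => acc + (g.getD j.toNat []).getD 0 0) 0

def solution_alt (N : Int) (K : Int) (plans : List (Int × Int)) : Int :=
  PySem.Int.mod
    (pvFirstSum N plans
      ((PySem.List.slice (pvPlanned N plans) (some 1) none).reverse.foldl pvBackStep
        ((PySem.List.pyRange 0 3 1).map (fun _ => [1, 1])))) 10000

-- ===== PRECONDITION & SPEC =====
-- Pre_ excludes N ≤ 0 and plan days outside [-N, N), on which A raises IndexError, and restricts
-- plan sauces to the natural domain 0..2 (the three real sauces): on malformed sauces A raises
-- IndexError for sauce < -3 or > 2, and for sauces -3..-1 silently wraps the sauce around the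
-- 3-row dp table or treats the day as free — see the cites in the claim.
def Pre_solution (N : Int) (K : Int) (plans : List (Int × Int)) : Prop :=
  1 ≤ N ∧ ∀ p ∈ plans, -N ≤ p.1 ∧ p.1 < N ∧ 0 ≤ p.2 ∧ p.2 ≤ 2
instance (N : Int) (K : Int) (plans : List (Int × Int)) : Decidable (Pre_solution N K plans) := by
  unfold Pre_solution; infer_instance

def pvWitness_solution : Int × Int × (List (Int × Int)) := (3, 2, [(1, 0)])

def Spec_solution (N : Int) (K : Int) (plans : List (Int × Int)) (out : Int) : Prop := out = solution_alt N K plans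
instance (N : Int) (K : Int) (plans : List (Int × Int)) (out : Int) : Decidable (Spec_solution N K plans out) := by unfold Spec_solution; infer_instance

-- ===== CLAIM (what is proved, stated in full; the proofs are below) =====
def Claim_equal_solution : Prop := ∀ (N : Int) (K : Int) (plans : List (Int × Int)), Dom_solution N K plans → Pre_solution N K plans → Spec_solution N K plans (solution N K plans)

-- ===== LEMMAS AND PROOFS =====

-- proof-side forward step characterising A's rows: state[j] = (ways ending in run 1, run 2)
def pvStepB (state : List (Int × Int)) (p : Int) : List (Int × Int) :=
  let total := state.foldl (fun acc ab => acc + (ab.1 + ab.2)) 0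
  (PySem.List.enumerate state).map (fun jab =>
    if p = -1 ∨ p = jab.1 then (PySem.Int.mod (total - jab.2.1 - jab.2.2) 10000, jab.2.1) else (0, 0))

-- a forward state rendered as a dp-table row
def pvRowOf (s : List (Int × Int)) : List (List Int) := s.map (fun ab => [ab.1, ab.2])

-- backward suffix table of B, as a foldr (= B's fold over the reversed list)
def pvOnes : List (List Int) := [[1, 1], [1, 1], [1, 1]]
def pvG (L : List Int) : List (List Int) := L.foldr (fun p g => pvBackStep g p) pvOnes

-- dot product of a forward state with a backward table
def pvSg (s : List (Int × Int)) (g : List (List Int)) : Int :=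
  ((s.zip g).map (fun x => x.1.1 * (x.2.getD 0 0) + x.1.2 * (x.2.getD 1 0))).sum

theorem pvSetIdx_length (xs : List Int) (i v : Int) : (pvSetIdx xs i v).length = xs.length := by
  unfold pvSetIdx; dsimp only; split <;> split <;> simp

theorem pvSetIdx_mem (xs : List Int) (i v : Int) (x : Int) (h : x ∈ pvSetIdx xs i v) :
    x ∈ xs ∨ x = v := by
  unfold pvSetIdx at h; dsimp only at h
  split at h
  · split at h
    · exact List.mem_or_eq_of_mem_set h
    · exact Or.inl h
  · split at h
    · exact List.mem_or_eq_of_mem_set h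
    · exact Or.inl h

theorem pvFoldSet_length (plans : List (Int × Int)) (init : List Int) :
    (plans.foldl (fun pl ds => pvSetIdx pl ds.1 ds.2) init).length = init.length := by
  induction plans generalizing init with
  | nil => rfl
  | cons p ps ih => simpa [pvSetIdx_length] using ih (pvSetIdx init p.1 p.2)

theorem pvPlanned_length (N : Int) (plans : List (Int × Int)) :
    (pvPlanned N plans).length = N.toNat := by
  unfold pvPlanned; simp [pvFoldSet_length]

theorem pvFoldSet_mem (plans : List (Int × Int)) (init : List Int) (x : Int)
    (h : x ∈ plans.foldl (fun pl ds => pvSetIdx pl ds.1 ds.2) init) :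
    x ∈ init ∨ ∃ p ∈ plans, x = p.2 := by
  induction plans generalizing init with
  | nil => exact Or.inl h
  | cons p ps ih =>
    rcases ih (pvSetIdx init p.1 p.2) h with h1 | ⟨q, hq, hx⟩
    · rcases pvSetIdx_mem init p.1 p.2 x h1 with h2 | h2
      · exact Or.inl h2
      · exact Or.inr ⟨p, List.mem_cons_self .., h2⟩
    · exact Or.inr ⟨q, List.mem_cons_of_mem _ hq, hx⟩

theorem pv_getD_replicate {α : Type} (n i : Nat) (a d : α) (h : i < n) :
    (List.replicate n a).getD i d = a := by
  simp [List.getD, h]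

theorem pv_getD_set_self {α : Type} (l : List α) (i : Nat) (v d : α) (h : i < l.length) :
    (l.set i v).getD i d = v := by
  simp [List.getD, h]

theorem pv_getD_set_ne {α : Type} (l : List α) (i j : Nat) (v d : α) (h : i ≠ j) :
    (l.set i v).getD j d = l.getD j d := by
  simp [List.getD, List.getElem?_set_ne h]

-- every planned sauce is -1 or one of the three real sauces
theorem pvPlanned_mem (N : Int) (plans : List (Int × Int))
    (hpl : ∀ p ∈ plans, -N ≤ p.1 ∧ p.1 < N ∧ 0 ≤ p.2 ∧ p.2 ≤ 2) :
    ∀ x ∈ pvPlanned N plans, x = -1 ∨ (0 ≤ x ∧ x ≤ 2) := by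
  intro x hx
  rcases pvFoldSet_mem plans _ x hx with h | ⟨p, hp, hx⟩
  · exact Or.inl (List.eq_of_mem_replicate h)
  · have h1 := hpl p hp
    subst hx; right; omega

theorem pv_len3 {α : Type} (s : List α) (h : s.length = 3) : ∃ x y z, s = [x, y, z] := by
  match s, h with
  | [x, y, z], _ => exact ⟨x, y, z, rfl⟩

theorem pvStepB_len (x y z : Int × Int) (p : Int) : (pvStepB [x, y, z] p).length = 3 := by
  simp [pvStepB, PySem.List.enumerate_cons, PySem.List.enumerate_nil]

theorem pvStepA_eq (x y z : Int × Int) (p : Int) (hp : p = -1 ∨ (0 ≤ p ∧ p ≤ 2)) :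
    pvStepRowA (pvRowOf [x, y, z]) pvZeroRow p = pvRowOf (pvStepB [x, y, z] p) := by
  obtain ⟨a0, b0⟩ := x; obtain ⟨a1, b1⟩ := y; obtain ⟨a2, b2⟩ := z
  have hc : p = -1 ∨ p = 0 ∨ p = 1 ∨ p = 2 := by omega
  rcases hc with h | h | h | h <;> subst h <;>
    simp [pvStepRowA, pvStepB, pvIdx3, pvRowOf, pvSetCell, pvCell, pvRSum,
      pvZeroRow, PySem.List.enumerate_cons, PySem.List.enumerate_nil, List.getD, List.range_succ] <;>
    and_intros <;> (congr 1; ring)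

theorem pv_loop_inv (P : List Int) (n : Nat) (hn : 1 ≤ n) (hPlen : P.length = n)
    (hPel : ∀ x ∈ P, x = -1 ∨ (0 ≤ x ∧ x ≤ 2))
    (s0 : List (Int × Int)) (hs0 : s0.length = 3) :
    ∀ k : Nat, k ≤ n - 1 →
      (((P.drop 1).take k).foldl pvStepB s0).length = 3 ∧
      (pvFoldA P ((List.replicate n pvZeroRow).set 0 (pvRowOf s0)) (1 + (k : Int))).length = n ∧
      (pvFoldA P ((List.replicate n pvZeroRow).set 0 (pvRowOf s0)) (1 + (k : Int))).getD k []
        = pvRowOf (((P.drop 1).take k).foldl pvStepB s0) ∧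
      (∀ m, k < m → m < n →
        (pvFoldA P ((List.replicate n pvZeroRow).set 0 (pvRowOf s0)) (1 + (k : Int))).getD m [] = pvZeroRow) := by
  intro k
  induction k with
  | zero =>
    intro _
    have hnil : PySem.List.pyRange 1 (1 + ((0 : Nat) : Int)) 1 = [] :=
      PySem.List.pyRange_one_eq_nil (by omega)
    unfold pvFoldA
    rw [hnil]
    refine ⟨hs0, by simp, ?_, ?_⟩
    · simp only [List.foldl_nil, List.take_zero]
      exact pv_getD_set_self _ 0 _ _ (by simp; omega)
    · intro m hm hmn
      simp only [List.foldl_nil]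
      rw [pv_getD_set_ne _ 0 m _ _ (by omega), pv_getD_replicate n m _ _ hmn]
  | succ k ih =>
    intro hk
    obtain ⟨ihlen3, ihTlen, ihTrow, ihTzero⟩ := ih (by omega)
    have hcast : (1 : Int) + ((k + 1 : Nat) : Int) = (1 + (k : Int)) + 1 := by push_cast; ring
    have hsplit : PySem.List.pyRange 1 (1 + ((k + 1 : Nat) : Int)) 1
        = PySem.List.pyRange 1 (1 + (k : Int)) 1 ++ [1 + (k : Int)] := by
      rw [hcast]; exact PySem.List.pyRange_one_succ_right (by omega)
    have hit : ((1 : Int) + (k : Int)).toNat = k + 1 := by omega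
    have hfold : pvFoldA P ((List.replicate n pvZeroRow).set 0 (pvRowOf s0)) (1 + ((k + 1 : Nat) : Int))
        = (pvFoldA P ((List.replicate n pvZeroRow).set 0 (pvRowOf s0)) (1 + (k : Int))).set (k + 1)
            (pvStepRowA
              ((pvFoldA P ((List.replicate n pvZeroRow).set 0 (pvRowOf s0)) (1 + (k : Int))).getD k [])
              ((pvFoldA P ((List.replicate n pvZeroRow).set 0 (pvRowOf s0)) (1 + (k : Int))).getD (k + 1) [])
              (P.getD (k + 1) 0)) := by
      unfold pvFoldA
      rw [hsplit, List.foldl_append]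
      simp only [List.foldl_cons, List.foldl_nil, hit]
      rfl
    have hk1n : k + 1 < n := by omega
    have hpel : P.getD (k + 1) 0 = -1 ∨ (0 ≤ P.getD (k + 1) 0 ∧ P.getD (k + 1) 0 ≤ 2) := by
      apply hPel
      rw [List.getD_eq_getElem _ _ (by omega)]
      exact List.getElem_mem _
    obtain ⟨x, y, z, hxyz⟩ := pv_len3 _ ihlen3
    have hstep : ((P.drop 1).take (k + 1)).foldl pvStepB s0
        = pvStepB (((P.drop 1).take k).foldl pvStepB s0) (P.getD (k + 1) 0) := by
      have hidx : (P.drop 1)[k]? = some (P.getD (k + 1) 0) := by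
        rw [List.getElem?_drop]
        rw [List.getD_eq_getElem _ _ (by omega : k + 1 < P.length)]
        have h1k : 1 + k = k + 1 := by omega
        rw [h1k]
        exact List.getElem?_eq_getElem (by omega)
      rw [List.take_add_one, hidx]
      simp [List.foldl_append]
    refine ⟨?_, ?_, ?_, ?_⟩
    · rw [hstep, hxyz]; exact pvStepB_len x y z _
    · rw [hfold]; simpa using ihTlen
    · rw [hfold, pv_getD_set_self _ (k + 1) _ _ (by omega), ihTrow,
        ihTzero (k + 1) (by omega) hk1n, hstep, hxyz]
      exact pvStepA_eq x y z _ hpel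
    · intro m hm hmn
      rw [hfold, pv_getD_set_ne _ (k + 1) m _ _ (by omega)]
      exact ihTzero m (by omega) hmn

-- modular bookkeeping for the adjoint argument
theorem pv_mod_cast (a : Int) : ((a % (10000 : Int) : Int) : ZMod 10000) = (a : ZMod 10000) := by
  have h : ((10000 : Nat) : Int) = (10000 : Int) := by norm_num
  rw [← h, ZMod.intCast_mod]

theorem pv_eq_of_cast (X Y : Int) (h : ((X : ZMod 10000)) = (Y : ZMod 10000)) :
    X % 10000 = Y % 10000 := by
  have h2 := (ZMod.intCast_eq_intCast_iff X Y 10000).mp h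
  simpa [Int.ModEq] using h2

theorem pvRange3 : PySem.List.pyRange 0 3 1 = [0, 1, 2] := by decide

theorem pvBack_shape (g : List (List Int)) (p : Int) :
    ∃ c0 d0 c1 d1 c2 d2 : Int, pvBackStep g p = [[c0, d0], [c1, d1], [c2, d2]] := by
  unfold pvBackStep
  rw [pvRange3]
  simp only [List.map_cons, List.map_nil]
  exact ⟨_, _, _, _, _, _, rfl⟩

theorem pvG_shape (L : List Int) :
    ∃ c0 d0 c1 d1 c2 d2 : Int, pvG L = [[c0, d0], [c1, d1], [c2, d2]] := by
  cases L with
  | nil => exact ⟨1, 1, 1, 1, 1, 1, rfl⟩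
  | cons p L => exact pvBack_shape (pvG L) p

-- the backward step is the adjoint of the forward step: dot products agree mod 10000
theorem pv_adjoint (x y z : Int × Int) (c0 d0 c1 d1 c2 d2 p : Int)
    (hp : p = -1 ∨ (0 ≤ p ∧ p ≤ 2)) :
    pvSg (pvStepB [x, y, z] p) [[c0, d0], [c1, d1], [c2, d2]] % 10000
      = pvSg [x, y, z] (pvBackStep [[c0, d0], [c1, d1], [c2, d2]] p) % 10000 := by
  obtain ⟨a0, b0⟩ := x; obtain ⟨a1, b1⟩ := y; obtain ⟨a2, b2⟩ := z
  have hm : ∀ a : Int, PySem.Int.mod a 10000 = a % 10000 :=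
    fun a => PySem.Int.mod_eq_emod_of_pos (by norm_num)
  have hc : p = -1 ∨ p = 0 ∨ p = 1 ∨ p = 2 := by omega
  rcases hc with h | h | h | h <;> subst h <;>
    simp only [pvStepB, pvBackStep, pvSg, pvRange3, hm,
      PySem.List.enumerate_cons, PySem.List.enumerate_nil,
      List.map_cons, List.map_nil, List.filter_cons, List.filter_nil, List.zip_cons_cons,
      List.zip_nil_right, List.sum_cons, List.sum_nil, List.foldl_cons, List.foldl_nil,
      List.getD, List.getElem?_cons_zero, List.getElem?_cons_succ, Option.getD_some] <;>
    simp <;>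
    (apply pv_eq_of_cast; push_cast [pv_mod_cast]; ring)

-- forward total equals the dot of the start state with the backward table, mod 10000
theorem pv_sum_eq (L : List Int) (hL : ∀ q ∈ L, q = -1 ∨ (0 ≤ q ∧ q ≤ 2)) :
    ∀ x y z : Int × Int,
      ((L.foldl pvStepB [x, y, z]).foldl (fun acc ab => acc + (ab.1 + ab.2)) 0) % 10000
        = pvSg [x, y, z] (pvG L) % 10000 := by
  induction L with
  | nil =>
    intro x y z
    obtain ⟨a0, b0⟩ := x; obtain ⟨a1, b1⟩ := y; obtain ⟨a2, b2⟩ := z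
    simp only [List.foldl_nil, pvG, List.foldr_nil, pvOnes, pvSg, List.zip_cons_cons,
      List.zip_nil_right, List.map_cons, List.map_nil, List.sum_cons, List.sum_nil,
      List.foldl_cons, List.getD, List.getElem?_cons_zero, List.getElem?_cons_succ,
      Option.getD_some]
    congr 1; ring
  | cons p L ih =>
    intro x y z
    have hp := hL p (List.mem_cons_self ..)
    have hL' : ∀ q ∈ L, q = -1 ∨ (0 ≤ q ∧ q ≤ 2) := fun q hq => hL q (List.mem_cons_of_mem _ hq)
    obtain ⟨x', y', z', hs⟩ := pv_len3 _ (pvStepB_len x y z p)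
    obtain ⟨c0, d0, c1, d1, c2, d2, hG⟩ := pvG_shape L
    calc (((p :: L).foldl pvStepB [x, y, z]).foldl (fun acc ab => acc + (ab.1 + ab.2)) 0) % 10000
        = ((L.foldl pvStepB [x', y', z']).foldl (fun acc ab => acc + (ab.1 + ab.2)) 0) % 10000 := by
          rw [List.foldl_cons, hs]
      _ = pvSg [x', y', z'] (pvG L) % 10000 := ih hL' x' y' z'
      _ = pvSg (pvStepB [x, y, z] p) (pvG L) % 10000 := by rw [hs]
      _ = pvSg [x, y, z] (pvBackStep (pvG L) p) % 10000 := by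
          rw [hG]; exact pv_adjoint x y z c0 d0 c1 d1 c2 d2 p hp
      _ = pvSg [x, y, z] (pvG (p :: L)) % 10000 := rfl

-- day-0: A's initial row and B's first-day sum come from the same start state s0
theorem pv_init (N : Int) (plans : List (Int × Int)) (hN : 1 ≤ N)
    (hpl : ∀ p ∈ plans, -N ≤ p.1 ∧ p.1 < N ∧ 0 ≤ p.2 ∧ p.2 ≤ 2) :
    ∃ s0 : List (Int × Int), s0.length = 3 ∧
      pvInitA N plans = (List.replicate N.toNat pvZeroRow).set 0 (pvRowOf s0) ∧
      ∀ c0 d0 c1 d1 c2 d2 : Int,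
        pvFirstSum N plans [[c0, d0], [c1, d1], [c2, d2]]
          = pvSg s0 [[c0, d0], [c1, d1], [c2, d2]] := by
  have hn : 1 ≤ N.toNat := by omega
  have hrep : (List.replicate N.toNat pvZeroRow).getD 0 [] = pvZeroRow :=
    pv_getD_replicate _ 0 _ _ (by omega)
  by_cases hc : (pvPlanned N plans).getD 0 (-1) = -1
  · refine ⟨[(1, 0), (1, 0), (1, 0)], rfl, ?_, ?_⟩
    · unfold pvInitA
      rw [if_pos hc, hrep]
      congr 1
    · intro c0 d0 c1 d1 c2 d2
      simp only [pvFirstSum, pvSg, pvRange3, hc, List.filter_cons, List.filter_nil]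
      simp
      try ring
  · have hne : plans ≠ [] := by
      intro h
      subst h
      exact hc (by
        unfold pvPlanned
        simpa using pv_getD_replicate N.toNat 0 (-1) (-1) (by omega))
    obtain ⟨q, qs, rfl⟩ := List.exists_cons_of_ne_nil hne
    have hq := hpl q (List.mem_cons_self ..)
    have hs3 : q.2 = 0 ∨ q.2 = 1 ∨ q.2 = 2 := by omega
    obtain ⟨d, s⟩ := q
    simp only at hs3
    rcases hs3 with h | h | h <;> subst h
    · refine ⟨[(1, 0), (0, 0), (0, 0)], rfl, ?_, ?_⟩
      · unfold pvInitA; rw [if_neg hc, if_pos (by norm_num), hrep]; congr 1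
      · intro c0 d0 c1 d1 c2 d2
        simp only [pvFirstSum, pvSg, pvRange3, List.filter_cons, List.filter_nil, hc]
        simp
        try ring
    · refine ⟨[(0, 0), (1, 0), (0, 0)], rfl, ?_, ?_⟩
      · unfold pvInitA; rw [if_neg hc, if_pos (by norm_num), hrep]; congr 1
      · intro c0 d0 c1 d1 c2 d2
        simp only [pvFirstSum, pvSg, pvRange3, List.filter_cons, List.filter_nil, hc]
        simp
        try ring
    · refine ⟨[(0, 0), (0, 0), (1, 0)], rfl, ?_, ?_⟩
      · unfold pvInitA; rw [if_neg hc, if_pos (by norm_num), hrep]; congr 1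
      · intro c0 d0 c1 d1 c2 d2
        simp only [pvFirstSum, pvSg, pvRange3, List.filter_cons, List.filter_nil, hc]
        simp
        try ring

theorem pv_main (N K : Int) (plans : List (Int × Int)) (hN : 1 ≤ N)
    (hpl : ∀ p ∈ plans, -N ≤ p.1 ∧ p.1 < N ∧ 0 ≤ p.2 ∧ p.2 ≤ 2) :
    solution N K plans = solution_alt N K plans := by
  have hn : 1 ≤ N.toNat := by omega
  obtain ⟨s0, hs0len, hInitA, hFS⟩ := pv_init N plans hN hpl
  have hPel := pvPlanned_mem N plans hpl
  have key := pv_loop_inv (pvPlanned N plans) N.toNat hn (pvPlanned_length N plans)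
    hPel s0 hs0len (N.toNat - 1) (le_refl _)
  have hNcast : (1 : Int) + ((N.toNat - 1 : Nat) : Int) = N := by omega
  rw [hNcast] at key
  obtain ⟨hsF3, _, hTrow, _⟩ := key
  have htake : ((pvPlanned N plans).drop 1).take (N.toNat - 1) = (pvPlanned N plans).drop 1 := by
    apply List.take_of_length_le
    rw [List.length_drop, pvPlanned_length]
  rw [htake] at hsF3 hTrow
  have hmod : ∀ a : Int, PySem.Int.mod a 10000 = a % 10000 :=
    fun a => PySem.Int.mod_eq_emod_of_pos (by norm_num)
  -- A's answer is the total of the final forward state, mod 10000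
  obtain ⟨x, y, z, hxyz⟩ := pv_len3 _ hsF3
  have hA : solution N K plans
      = ((((pvPlanned N plans).drop 1).foldl pvStepB s0).foldl
          (fun acc ab => acc + (ab.1 + ab.2)) 0) % 10000 := by
    obtain ⟨a0, b0⟩ := x; obtain ⟨a1, b1⟩ := y; obtain ⟨a2, b2⟩ := z
    unfold solution
    rw [hInitA, hTrow, hxyz, hmod]
    simp only [pvRowOf, List.map_cons, List.map_nil, pvRSum, pvCell, List.getD, List.foldl_cons,
      List.foldl_nil, List.getElem?_cons_zero, List.getElem?_cons_succ, Option.getD_some]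
    congr 1; ring
  -- B's answer is the dot of the start state with the backward table, mod 10000
  have hLdrop : ∀ q ∈ (pvPlanned N plans).drop 1, q = -1 ∨ (0 ≤ q ∧ q ≤ 2) :=
    fun q hq => hPel q (List.mem_of_mem_drop hq)
  obtain ⟨c0, d0, c1, d1, c2, d2, hG⟩ := pvG_shape ((pvPlanned N plans).drop 1)
  have hB : solution_alt N K plans
      = pvSg s0 (pvG ((pvPlanned N plans).drop 1)) % 10000 := by
    unfold solution_alt
    have hslice : PySem.List.slice (pvPlanned N plans) (some 1) none
        = (pvPlanned N plans).drop 1 := by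
      rw [PySem.List.slice_from_one]
      exact List.drop_one.symm
    have hinit : (PySem.List.pyRange 0 3 1).map (fun _ => ([1, 1] : List Int)) = pvOnes := by
      rw [pvRange3]; rfl
    rw [hmod, hslice, hinit, List.foldl_reverse]
    rw [show (((pvPlanned N plans).drop 1).foldr (fun x y => pvBackStep y x) pvOnes)
          = pvG ((pvPlanned N plans).drop 1) from rfl]
    rw [hG, hFS]
  obtain ⟨x0, y0, z0, hs0⟩ := pv_len3 _ hs0len
  rw [hA, hB, hs0]
  exact pv_sum_eq ((pvPlanned N plans).drop 1) hLdrop x0 y0 z0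

-- ===== VERDICT (by name: the statement is the Claim_ definition above) =====
theorem solution_spec : Claim_equal_solution := by
  intro N K plans _ hP
  exact pv_main N K plans hP.1 hP.2
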